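-- pv_equiv track=rewrite | github.com/Thrilok28021996/python_AGI | auto_agent_router.py | _order_agents_logically
-- ===== SOURCE A (Python) =====
-- from typing import List, Dict, Tuple
--
-- def _order_agents_logically(agents: List[str], task_type: str) -> List[str]:
--     """Order agents in a logical workflow sequence"""
--
--     # Define typical workflow order
--     workflow_order = [
--         "ceo",
--         "product_manager",
--         "designer",
--         "lead_developer",
--         "backend_developer",
--         "frontend_developer",
--         "devops",
--         "qa_tester",
--         "security",
--         "tech_writer"
--     ]
--
--     # Filter and order based on workflow
--     ordered = []
--     for role in workflow_order:
--         if role in agents: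
--             ordered.append(role)
--
--     # Add any remaining agents not in the standard order
--     for agent in agents:
--         if agent not in ordered:
--             ordered.append(agent)
--
--     return ordered
-- ===== SOURCE B (Python) =====
-- from typing import List
--
-- def _order_agents_logically(agents: List[str], task_type: str) -> List[str]:
--     """Order agents in a logical workflow sequence"""
--
--     workflow_order = [
--         "ceo",
--         "product_manager",
--         "designer",
--         "lead_developer",
--         "backend_developer",
--         "frontend_developer",
--         "devops",
--         "qa_tester",
--         "security",
--         "tech_writer"
--     ]
--
--     rank = {role: i for i, role in enumerate(workflow_order)}
--     unique = list(dict.fromkeys(agents))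
--     return sorted(unique, key=lambda a: rank.get(a, len(workflow_order)))
-- ===== Notes on version B (the rewrite author's own statement) =====
-- stated objective: faster
-- what changed: Replaces A's two filtered scans (the second of which rescans the growing output list for each membership test) with a rank table built from enumerate(workflow_order), an ordered dedup via dict.fromkeys, and one stable sort keyed by rank.
import Mathlib
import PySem

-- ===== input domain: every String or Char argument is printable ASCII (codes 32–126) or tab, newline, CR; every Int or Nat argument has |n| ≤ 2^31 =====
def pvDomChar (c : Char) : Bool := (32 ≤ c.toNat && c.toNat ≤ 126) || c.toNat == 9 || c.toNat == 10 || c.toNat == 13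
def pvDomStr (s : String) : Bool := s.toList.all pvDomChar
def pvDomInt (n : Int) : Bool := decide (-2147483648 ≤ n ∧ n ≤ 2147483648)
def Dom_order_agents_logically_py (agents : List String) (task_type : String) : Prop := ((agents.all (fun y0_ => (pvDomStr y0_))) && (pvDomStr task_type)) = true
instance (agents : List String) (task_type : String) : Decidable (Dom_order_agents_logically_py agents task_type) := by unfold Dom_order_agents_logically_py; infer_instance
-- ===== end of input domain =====

-- B replaces A's two filtered scans (the second of which rescans the growing output) by a
-- rank table plus ordered dedup plus one stable sort — simpler and asymptotically better.

-- ===== PORT A =====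
def order_agents_logically_py (agents : List String) (task_type : String) : List String :=
  let workflow_order : List String :=
    ["ceo", "product_manager", "designer", "lead_developer", "backend_developer",
     "frontend_developer", "devops", "qa_tester", "security", "tech_writer"]
  -- for role in workflow_order: if role in agents: ordered.append(role)
  let ordered := workflow_order.foldl
    (fun acc role => if role ∈ agents then acc ++ [role] else acc) []
  -- for agent in agents: if agent not in ordered: ordered.append(agent)
  agents.foldl (fun acc agent => if agent ∉ acc then acc ++ [agent] else acc) ordered

-- ===== PORT B =====
def order_agents_logically_py_alt (agents : List String) (task_type : String) : List String :=
  let workflow_order : List String :=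
    ["ceo", "product_manager", "designer", "lead_developer", "backend_developer",
     "frontend_developer", "devops", "qa_tester", "security", "tech_writer"]
  -- rank = {role: i for i, role in enumerate(workflow_order)}
  let rank : PySem.Dict String Int :=
    (PySem.List.enumerate workflow_order 0).foldl
      (fun d p => d.insert p.2 p.1) PySem.Dict.empty
  -- unique = list(dict.fromkeys(agents))
  let unique := PySem.List.dedup agents
  -- sorted(unique, key=lambda a: rank.get(a, len(workflow_order)))
  PySem.List.sorted unique (fun a => rank.getD a (PySem.List.len workflow_order)) false

-- ===== PRECONDITION & SPEC =====
def Spec_order_agents_logically_py (agents : List String) (task_type : String) (out : List String) : Prop := out = order_agents_logically_py_alt agents task_type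
instance (agents : List String) (task_type : String) (out : List String) : Decidable (Spec_order_agents_logically_py agents task_type out) := by unfold Spec_order_agents_logically_py; infer_instance

-- ===== CLAIM (what is proved, stated in full; the proofs are below) =====
def Claim_equal_order_agents_logically_py : Prop := ∀ (agents : List String) (task_type : String), Dom_order_agents_logically_py agents task_type → Spec_order_agents_logically_py agents task_type (order_agents_logically_py agents task_type)

-- ===== LEMMAS AND PROOFS =====

-- The fixed workflow list, for the proofs.
def pvW : List String :=
  ["ceo", "product_manager", "designer", "lead_developer", "backend_developer",
   "frontend_developer", "devops", "qa_tester", "security", "tech_writer"]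

-- B's key function, written out (the rank dict is a closed literal).
def pvKey (a : String) : Int :=
  if a = "ceo" then 0 else if a = "product_manager" then 1 else if a = "designer" then 2
  else if a = "lead_developer" then 3 else if a = "backend_developer" then 4
  else if a = "frontend_developer" then 5 else if a = "devops" then 6
  else if a = "qa_tester" then 7 else if a = "security" then 8
  else if a = "tech_writer" then 9 else 10

-- the stable-sort grouping: concatenation of the key-level groups, in key order
def pvGroups (key : String → Int) (xs : List String) (N : Nat) : List String :=
  (List.range (N+1)).flatMap (fun (v : Nat) => xs.filter (fun a => key a == (v : Int)))

lemma pv_insertBy_append (key : String → Int) (x : String) (as bs : List String)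
    (h : ∀ a ∈ as, ¬ key x < key a) :
    PySem.List.insertBy (fun a b => decide (key a < key b)) x (as ++ bs)
      = as ++ PySem.List.insertBy (fun a b => decide (key a < key b)) x bs := by
  induction as with
  | nil => simp
  | cons a as ih =>
    have ha : decide (key x < key a) = false := by
      simpa using h a (by simp)
    simp only [List.cons_append, PySem.List.insertBy, ha, Bool.false_eq_true, if_false]
    rw [ih (fun a ha' => h a (by simp [ha']))]

lemma pv_sorted_groups (key : String → Int) (N : Nat) (xs : List String)
    (hb : ∀ a ∈ xs, 0 ≤ key a ∧ key a ≤ (N : Int)) :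
    PySem.List.sorted xs key false = pvGroups key xs N := by
  rw [PySem.List.sorted_eq_foldl_insertBy]
  induction xs using List.reverseRecOn with
  | nil => simp [pvGroups]
  | append_singleton xs x ih =>
    have hbxs : ∀ a ∈ xs, 0 ≤ key a ∧ key a ≤ (N : Int) :=
      fun a ha => hb a (by simp [ha])
    obtain ⟨hx0, hxN⟩ := hb x (by simp)
    obtain ⟨m, hkx, hmN⟩ : ∃ m : Nat, key x = (m : Int) ∧ m ≤ N :=
      ⟨(key x).toNat, by omega, by omega⟩
    rw [List.foldl_append, List.foldl_cons, List.foldl_nil, ih hbxs]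
    have hsplit : List.range (N+1) = List.range (m+1) ++ (List.range (N-m)).map (m+1+·) := by
      rw [← List.range_add]; congr 1; omega
    have hlowmem : ∀ a ∈ (List.range (m+1)).flatMap
        (fun (v : Nat) => xs.filter (fun a => key a == (v : Int))), ¬ key x < key a := by
      intro a ha
      obtain ⟨v, hv, haf⟩ := List.mem_flatMap.mp ha
      have hva : key a = (v : Int) := by
        have := (List.mem_filter.mp haf).2; simpa using this
      have : v < m + 1 := List.mem_range.mp hv
      omega
    have hhighmem : ∀ b ∈ ((List.range (N-m)).map (m+1+·)).flatMap
        (fun (v : Nat) => xs.filter (fun a => key a == (v : Int))), key x < key b := by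
      intro b hbm
      obtain ⟨v, hv, hbf⟩ := List.mem_flatMap.mp hbm
      obtain ⟨w, _, rfl⟩ := List.mem_map.mp hv
      have hvb : key b = ((m+1+w : Nat) : Int) := by
        have := (List.mem_filter.mp hbf).2; simpa using this
      omega
    rw [pvGroups, hsplit, List.flatMap_append, pv_insertBy_append key x _ _ hlowmem]
    -- insert x at the head of the strictly-greater groups
    have hins : PySem.List.insertBy (fun a b => decide (key a < key b)) x
        (((List.range (N-m)).map (m+1+·)).flatMap (fun (v : Nat) => xs.filter (fun a => key a == (v : Int))))
        = x :: ((List.range (N-m)).map (m+1+·)).flatMap (fun (v : Nat) => xs.filter (fun a => key a == (v : Int))) := by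
      cases hh : ((List.range (N-m)).map (m+1+·)).flatMap (fun (v : Nat) => xs.filter (fun a => key a == (v : Int))) with
      | nil => simp [PySem.List.insertBy]
      | cons b t =>
        have hb' : decide (key x < key b) = true := by
          have := hhighmem b (by rw [hh]; simp)
          simpa using this
        simp [PySem.List.insertBy, hb']
    rw [hins, pvGroups, hsplit, List.flatMap_append]
    -- the new element lands at the end of group m
    have hgrp_low : (List.range (m+1)).flatMap (fun (v : Nat) => (xs ++ [x]).filter (fun a => key a == (v : Int)))
        = (List.range (m+1)).flatMap (fun (v : Nat) => xs.filter (fun a => key a == (v : Int))) ++ [x] := by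
      rw [List.range_succ, List.flatMap_append, List.flatMap_append]
      have h1 : (List.range m).flatMap (fun (v : Nat) => (xs ++ [x]).filter (fun a => key a == (v : Int)))
          = (List.range m).flatMap (fun (v : Nat) => xs.filter (fun a => key a == (v : Int))) := by
        apply List.flatMap_congr
        intro v hv
        have hvm : v < m := List.mem_range.mp hv
        rw [List.filter_append]
        have hne : (key x == (v:Int)) = false := by simp [hkx]; omega
        have : [x].filter (fun a => key a == (v : Int)) = [] := by simp [List.filter, hne]
        rw [this, List.append_nil]
      have h2 : [m].flatMap (fun (v : Nat) => (xs ++ [x]).filter (fun a => key a == (v : Int)))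
          = [m].flatMap (fun (v : Nat) => xs.filter (fun a => key a == (v : Int))) ++ [x] := by
        have hq : (key x == (m:Int)) = true := by simp [hkx]
        simp [List.filter_append, List.filter, hq]
      rw [h1, h2, List.append_assoc]
    have hgrp_high : ((List.range (N-m)).map (m+1+·)).flatMap (fun (v : Nat) => (xs ++ [x]).filter (fun a => key a == (v : Int)))
        = ((List.range (N-m)).map (m+1+·)).flatMap (fun (v : Nat) => xs.filter (fun a => key a == (v : Int))) := by
      apply List.flatMap_congr
      intro v hv
      obtain ⟨w, _, rfl⟩ := List.mem_map.mp hv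
      rw [List.filter_append]
      have hne : (key x == ((m:Int) + 1 + (w:Int))) = false := by simp [hkx]; omega
      have : [x].filter (fun a => key a == ((m+1+w : Nat) : Int)) = [] := by
        simp only [List.filter]; push_cast; simp [hne]
      rw [this, List.append_nil]
    rw [hgrp_low, hgrp_high, List.append_assoc, List.singleton_append]

-- filter as a flatMap of singletons (used to line A's filtered head up with B's groups)
lemma pv_filter_eq_flatMap (W : List String) (p : String → Bool) :
    W.filter p = W.flatMap (fun w => if p w then [w] else []) := by
  induction W with
  | nil => simp
  | cons w W ih =>
    by_cases h : p w <;> simp [h, ih]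

-- on a Nodup list, filtering by equality keeps at most the one occurrence
lemma pv_filter_beq_nodup (l : List String) (hl : l.Nodup) (x : String) :
    l.filter (· == x) = if x ∈ l then [x] else [] := by
  rw [List.filter_beq]
  by_cases h : x ∈ l
  · simp [h, List.count_eq_one_of_mem hl h]
  · simp [h, List.count_eq_zero_of_not_mem h]

lemma pv_alt_unfold (agents : List String) (task_type : String) :
    order_agents_logically_py_alt agents task_type
      = PySem.List.sorted (PySem.List.dedup agents) pvKey false := by
  have h1 : order_agents_logically_py_alt agents task_type
      = PySem.List.sorted (PySem.List.dedup agents)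
          (fun a => (PySem.Dict.mk [("ceo", (0:Int)), ("product_manager", 1), ("designer", 2),
            ("lead_developer", 3), ("backend_developer", 4), ("frontend_developer", 5),
            ("devops", 6), ("qa_tester", 7), ("security", 8), ("tech_writer", 9)]).getD a 10) false := rfl
  rw [h1]
  congr 1
  funext a
  by_cases h0 : a = "ceo"
  · subst h0; decide
  by_cases h1 : a = "product_manager"
  · subst h1; decide
  by_cases h2 : a = "designer"
  · subst h2; decide
  by_cases h3 : a = "lead_developer"
  · subst h3; decide
  by_cases h4 : a = "backend_developer"
  · subst h4; decide
  by_cases h5 : a = "frontend_developer"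
  · subst h5; decide
  by_cases h6 : a = "devops"
  · subst h6; decide
  by_cases h7 : a = "qa_tester"
  · subst h7; decide
  by_cases h8 : a = "security"
  · subst h8; decide
  by_cases h9 : a = "tech_writer"
  · subst h9; decide
  simp [PySem.Dict.getD_eq_get?_getD, pvKey,
    Ne.symm h0, Ne.symm h1, Ne.symm h2, Ne.symm h3, Ne.symm h4, Ne.symm h5,
    Ne.symm h6, Ne.symm h7, Ne.symm h8, Ne.symm h9, h0, h1, h2, h3, h4, h5, h6, h7, h8, h9,
    PySem.Dict.get?]

lemma pv_key_bounds (a : String) : 0 ≤ pvKey a ∧ pvKey a ≤ (10 : Int) := by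
  unfold pvKey; split_ifs <;> norm_num

-- A's result, in closed form
lemma pv_A_eq (agents : List String) (task_type : String) :
    order_agents_logically_py agents task_type
      = pvW.filter (fun r => decide (r ∈ agents))
        ++ (PySem.Set.ofList agents).filter
             (fun y => !(PySem.Set.contains (pvW.filter (fun r => decide (r ∈ agents))) y)) := by
  rw [show order_agents_logically_py agents task_type
        = agents.foldl (fun acc agent => if agent ∉ acc then acc ++ [agent] else acc)
            (pvW.foldl (fun acc role => if role ∈ agents then acc ++ [role] else acc) []) from rfl]
  rw [PySem.List.foldl_append_ite_eq_filter]
  have hbody : (fun (acc : List String) agent => if agent ∉ acc then acc ++ [agent] else acc)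
      = fun acc agent => PySem.Set.add acc agent := by
    funext acc agent
    rw [PySem.Set.add_eq_ite]
    by_cases h : agent ∈ acc <;> simp [h]
  rw [hbody]
  show PySem.Set.update (List.nil ++ pvW.filter fun r => decide (r ∈ agents)) agents = _
  rw [List.nil_append, PySem.Set.update_eq_append_filter]

lemma pv_group_small (agents : List String) (w : String) (vi : Int)
    (hw : ∀ a : String, (pvKey a == vi) = (a == w)) :
    (PySem.List.dedup agents).filter (fun a => pvKey a == vi)
      = if w ∈ agents then [w] else [] := by
  rw [List.filter_congr (fun a _ => hw a),
      pv_filter_beq_nodup _ (by simpa using PySem.Set.nodup_ofList agents) w]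
  simp

-- the non-workflow group is exactly A's remainder filter
lemma pv_tail_eq (agents : List String) :
    (PySem.List.dedup agents).filter (fun a => pvKey a == (10 : Int))
      = (PySem.Set.ofList agents).filter
          (fun y => !(PySem.Set.contains (pvW.filter (fun r => decide (r ∈ agents))) y)) := by
  rw [PySem.List.dedup_eq_ofList]
  apply List.filter_congr
  intro a ha
  have hag : a ∈ agents := by simpa [PySem.Set.mem_ofList] using ha
  by_cases hw : a ∈ pvW
  · have h1 : PySem.Set.contains (pvW.filter (fun r => decide (r ∈ agents))) a = true :=
      (PySem.Set.contains_iff _ _).mpr (List.mem_filter.mpr ⟨hw, by simp [hag]⟩)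
    have h2 : (pvKey a == (10 : Int)) = false := by
      simp only [pvW] at hw
      simp only [List.mem_cons, List.not_mem_nil, or_false] at hw
      rcases hw with rfl|rfl|rfl|rfl|rfl|rfl|rfl|rfl|rfl|rfl <;> decide
    rw [h1, h2]; rfl
  · have h1 : PySem.Set.contains (pvW.filter (fun r => decide (r ∈ agents))) a = false := by
      apply Bool.eq_false_iff.mpr
      intro h
      exact hw (List.mem_filter.mp ((PySem.Set.contains_iff _ _).mp h)).1
    have h2 : (pvKey a == (10 : Int)) = true := by
      simp only [pvW, List.mem_cons, List.not_mem_nil, or_false, not_or] at hw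
      unfold pvKey
      split_ifs <;> simp_all
    rw [h1, h2]; rfl

-- ===== VERDICT (by name: the statement is the Claim_ definition above) =====
set_option maxHeartbeats 4000000 in
theorem order_agents_logically_py_spec : Claim_equal_order_agents_logically_py := by
  intro agents task_type _
  show order_agents_logically_py agents task_type = order_agents_logically_py_alt agents task_type
  rw [pv_alt_unfold, pv_A_eq,
      pv_sorted_groups pvKey 10 _ (fun a _ => pv_key_bounds a)]
  rw [pvGroups, show List.range 11 = [0,1,2,3,4,5,6,7,8,9,10] from rfl]
  simp only [List.flatMap_cons, List.flatMap_nil, List.append_nil]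
  push_cast
  rw [pv_group_small agents "ceo" 0 (fun a => by unfold pvKey; split_ifs <;> simp_all),
      pv_group_small agents "product_manager" 1 (fun a => by unfold pvKey; split_ifs <;> simp_all),
      pv_group_small agents "designer" 2 (fun a => by unfold pvKey; split_ifs <;> simp_all),
      pv_group_small agents "lead_developer" 3 (fun a => by unfold pvKey; split_ifs <;> simp_all),
      pv_group_small agents "backend_developer" 4 (fun a => by unfold pvKey; split_ifs <;> simp_all),
      pv_group_small agents "frontend_developer" 5 (fun a => by unfold pvKey; split_ifs <;> simp_all),
      pv_group_small agents "devops" 6 (fun a => by unfold pvKey; split_ifs <;> simp_all),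
      pv_group_small agents "qa_tester" 7 (fun a => by unfold pvKey; split_ifs <;> simp_all),
      pv_group_small agents "security" 8 (fun a => by unfold pvKey; split_ifs <;> simp_all),
      pv_group_small agents "tech_writer" 9 (fun a => by unfold pvKey; split_ifs <;> simp_all),
      pv_tail_eq agents]
  rw [pv_filter_eq_flatMap]
  simp only [pvW, List.flatMap_cons, List.flatMap_nil, List.append_nil, decide_eq_true_eq]
  simp [List.append_assoc]
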